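-- pv_equiv track=rewrite | github.com/BareTread/inteles-vault | scripts/twop/audit_and_fix_affiliates.py | chunk_by_products
-- ===== SOURCE A (Python) =====
-- from typing import Dict, List, Optional, Tuple
--
-- def chunk_by_products(md_text: str) -> List[Tuple[str, str]]:
--     """Split the master list into chunks keyed by their product heading.
--     Returns list of (key, chunk_text). key is the heading for product chunks, or "__OTHER__" for non-product regions.
--     """
--     lines = md_text.splitlines(keepends=True)
--     chunks: List[Tuple[str, List[str]]] = []
--     current_key = "__OTHER__"
--     current: List[str] = []
--     for ln in lines:
--         if ln.startswith("### "):
--             # flush previous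
--             if current:
--                 chunks.append((current_key, current))
--             current_key = ln.strip()
--             current = [ln]
--         else:
--             current.append(ln)
--     if current:
--         chunks.append((current_key, current))
--     # join back
--     return [(k, "".join(v)) for k, v in chunks]
-- ===== SOURCE B (Python) =====
-- from typing import List, Tuple
--
-- def chunk_by_products(md_text: str) -> List[Tuple[str, str]]:
--     """Peel one chunk at a time: head line + following non-heading lines, then recurse on the rest."""
--     lines = md_text.splitlines(keepends=True)
--     out: List[Tuple[str, str]] = []
--     while lines:
--         head, rest = lines[0], lines[1:]
--         body: List[str] = []
--         for ln in rest:
--             if ln.startswith("### "):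
--                 break
--             body.append(ln)
--         key = head.strip() if head.startswith("### ") else "__OTHER__"
--         out.append((key, "".join([head] + body)))
--         lines = rest[len(body):]
--     return out
-- ===== Notes on version B (the rewrite author's own statement) =====
-- stated objective: alternative
-- what changed: Replaces A's single accumulator pass (chunks list + current_key + current buffer with flush-on-heading) by an outer loop that peels one chunk at a time: take the head line, scan forward for the body up to the next heading, emit (key, joined slice), and continue on the remaining suffix.
import Mathlib
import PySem

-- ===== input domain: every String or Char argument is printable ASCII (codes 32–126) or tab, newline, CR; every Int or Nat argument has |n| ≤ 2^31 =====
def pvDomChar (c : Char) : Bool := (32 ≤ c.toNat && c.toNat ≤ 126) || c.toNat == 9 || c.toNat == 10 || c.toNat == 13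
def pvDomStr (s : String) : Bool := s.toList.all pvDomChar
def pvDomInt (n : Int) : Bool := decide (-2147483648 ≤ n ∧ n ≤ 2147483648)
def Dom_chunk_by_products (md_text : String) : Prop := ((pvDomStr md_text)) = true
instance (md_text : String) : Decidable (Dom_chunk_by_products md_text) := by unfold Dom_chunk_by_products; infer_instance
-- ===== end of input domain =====

-- B peels one chunk (head line + following non-heading lines) per outer step instead of A's
-- single flush-on-heading accumulator pass; same cost, different decomposition ("alternative").

-- Shared helper: Python's str.splitlines(keepends=True). Exact on the Dom alphabet, where the
-- only line breaks are '\n', '\r' and '\r\n' (Python's further break characters lie outside Dom).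
def pvSplitKeepGo : List Char → List Char → List (List Char)
  | acc, [] => if acc.isEmpty then [] else [acc.reverse]
  | acc, '\r' :: '\n' :: rest => (acc.reverse ++ ['\r', '\n']) :: pvSplitKeepGo [] rest
  | acc, c :: rest =>
      if c = '\n' ∨ c = '\r' then (acc.reverse ++ [c]) :: pvSplitKeepGo [] rest
      else pvSplitKeepGo (c :: acc) rest

def pvSplitKeep (s : String) : List String :=
  (pvSplitKeepGo [] s.toList).map String.ofList

-- ===== PORT A =====
-- A's loop body; state = (chunks so far, current_key, current buffer)
def chunkStep (st : List (String × List String) × String × List String) (ln : String) :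
    List (String × List String) × String × List String :=
  if PySem.Str.startswith ln "### " then
    ((if st.2.2.isEmpty then st.1 else st.1 ++ [(st.2.1, st.2.2)]), PySem.Str.strip ln, [ln])
  else
    (st.1, st.2.1, st.2.2 ++ [ln])

def chunk_by_products (md_text : String) : List (String × String) :=
  let st := (pvSplitKeep md_text).foldl chunkStep ([], "__OTHER__", [])
  let chunks := if st.2.2.isEmpty then st.1 else st.1 ++ [(st.2.1, st.2.2)]
  chunks.map (fun kv => (kv.1, PySem.Str.join "" kv.2))

-- ===== PORT B =====
-- B's outer loop: peel the head line plus its body (the for-with-break = takeWhile,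
-- rest[len(body):] = drop) and recurse on the remaining suffix.
def chunkAltGo : List String → List (String × String)
  | [] => []
  | head :: rest =>
      let body := rest.takeWhile (fun ln => !(PySem.Str.startswith ln "### "))
      let key := if PySem.Str.startswith head "### " then PySem.Str.strip head else "__OTHER__"
      (key, PySem.Str.join "" (head :: body)) :: chunkAltGo (rest.drop body.length)
  termination_by ls => ls.length
  decreasing_by simp

def chunk_by_products_alt (md_text : String) : List (String × String) :=
  chunkAltGo (pvSplitKeep md_text)

-- ===== PRECONDITION & SPEC =====
def Spec_chunk_by_products (md_text : String) (out : List (String × String)) : Prop := out = chunk_by_products_alt md_text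
instance (md_text : String) (out : List (String × String)) : Decidable (Spec_chunk_by_products md_text out) := by unfold Spec_chunk_by_products; infer_instance

-- ===== CLAIM (what is proved, stated in full; the proofs are below) =====
def Claim_equal_chunk_by_products : Prop := ∀ (md_text : String), Dom_chunk_by_products md_text → Spec_chunk_by_products md_text (chunk_by_products md_text)

-- ===== LEMMAS AND PROOFS =====
def pvJP (kv : String × List String) : String × String := (kv.1, PySem.Str.join "" kv.2)

def pvFinish (st : List (String × List String) × String × List String) : List (String × List String) :=
  if st.2.2.isEmpty then st.1 else st.1 ++ [(st.2.1, st.2.2)]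

theorem chunkAltGo_nil : chunkAltGo [] = [] := by rw [chunkAltGo]

theorem chunkAltGo_cons (head : String) (rest : List String) : chunkAltGo (head :: rest) =
    ((if PySem.Str.startswith head "### " then PySem.Str.strip head else "__OTHER__"),
      PySem.Str.join "" (head :: rest.takeWhile (fun ln => !(PySem.Str.startswith ln "### ")))) ::
      chunkAltGo (rest.drop (rest.takeWhile (fun ln => !(PySem.Str.startswith ln "### "))).length) := by
  rw [chunkAltGo]

-- Invariant of A's fold, phrased against B's recursion: starting from a NONEMPTY buffer `cur`,
-- finishing A's loop yields the chunks so far, then (key, cur ++ leading non-heading lines),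
-- then B's recursion on the remaining suffix.
theorem chunkFold_eq (lines : List String) :
    ∀ (chunks : List (String × List String)) (key : String) (cur : List String), cur ≠ [] →
      (pvFinish (lines.foldl chunkStep (chunks, key, cur))).map pvJP =
      chunks.map pvJP ++
        (key, PySem.Str.join "" (cur ++ lines.takeWhile (fun ln => !(PySem.Str.startswith ln "### ")))) ::
        chunkAltGo (lines.drop (lines.takeWhile (fun ln => !(PySem.Str.startswith ln "### "))).length) := by
  induction lines with
  | nil =>
      intro chunks key cur hcur
      have hne : cur.isEmpty = false := by simpa using hcur
      simp [pvFinish, pvJP, hne, chunkAltGo_nil]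
  | cons ln rest ih =>
      intro chunks key cur hcur
      have hne : cur.isEmpty = false := by simpa using hcur
      by_cases h : PySem.Str.startswith ln "### " = true
      · have hc : PySem.Chars.startswith ln.toList ['#', '#', '#', ' '] = true := by simpa using h
        have hstep : chunkStep (chunks, key, cur) ln = (chunks ++ [(key, cur)], PySem.Str.strip ln, [ln]) := by
          unfold chunkStep; rw [if_pos h, hne]; simp
        rw [List.foldl_cons, hstep, ih _ _ _ (by simp)]
        conv_rhs => rw [List.takeWhile_cons]
        simp only [h, Bool.not_true, Bool.false_eq_true, if_false, List.length_nil, List.drop_zero]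
        conv_rhs => rw [chunkAltGo_cons]
        simp [pvJP, hc]
      · have hc : PySem.Chars.startswith ln.toList ['#', '#', '#', ' '] = false := by
          simpa using h
        have hstep : chunkStep (chunks, key, cur) ln = (chunks, key, cur ++ [ln]) := by
          unfold chunkStep; rw [if_neg h]
        rw [List.foldl_cons, hstep, ih _ _ _ (by simp)]
        conv_rhs => rw [List.takeWhile_cons]
        simp [pvJP, hc]

theorem chunk_by_products_eq_alt (md_text : String) :
    chunk_by_products md_text = chunk_by_products_alt md_text := by
  show (pvFinish ((pvSplitKeep md_text).foldl chunkStep ([], "__OTHER__", []))).map pvJP =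
    chunkAltGo (pvSplitKeep md_text)
  cases hl : pvSplitKeep md_text with
  | nil => simp [pvFinish, pvJP, chunkAltGo_nil]
  | cons ln rest =>
      by_cases h : PySem.Str.startswith ln "### " = true
      · have hc : PySem.Chars.startswith ln.toList ['#', '#', '#', ' '] = true := by simpa using h
        have hstep : chunkStep ([], "__OTHER__", []) ln = ([], PySem.Str.strip ln, [ln]) := by
          unfold chunkStep; rw [if_pos h]; simp
        rw [List.foldl_cons, hstep, chunkFold_eq rest _ _ _ (by simp), chunkAltGo_cons]
        simp [pvJP, hc]
      · have hc : PySem.Chars.startswith ln.toList ['#', '#', '#', ' '] = false := by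
          simpa using h
        have hstep : chunkStep ([], "__OTHER__", []) ln = ([], "__OTHER__", [ln]) := by
          unfold chunkStep; rw [if_neg h]; simp
        rw [List.foldl_cons, hstep, chunkFold_eq rest _ _ _ (by simp), chunkAltGo_cons]
        simp [pvJP, hc]

-- ===== VERDICT (by name: the statement is the Claim_ definition above) =====
theorem chunk_by_products_spec : Claim_equal_chunk_by_products := by
  intro md_text _
  unfold Spec_chunk_by_products
  exact chunk_by_products_eq_alt md_text
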